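-- pv_equiv track=rewrite | github.com/joaofernandessaad-cpu/Ex-de-programa-ao-2-joao-saad | funcoes.py | calcula_pontos_quadra
-- ===== SOURCE A (Python) =====
-- def calcula_pontos_quadra(dados):
--     contagem = {}
--     for d in dados:
--         contagem[d] = contagem.get(d, 0) + 1
--     for v in contagem.values():
--         if v >= 4:
--             total = 0
--             for d in dados:
--                 total += d
--             return total
--     return 0
-- ===== SOURCE B (Python) =====
-- def calcula_pontos_quadra(dados):
--     run = 0
--     prev = None
--     for x in sorted(dados):
--         run = run + 1 if x == prev else 1
--         prev = x
--         if run >= 4: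
--             return sum(dados)
--     return 0
-- ===== Notes on version B (the rewrite author's own statement) =====
-- stated objective: alternative
-- what changed: Replaced the dict frequency count plus values scan by a sort-then-single-linear-scan that tracks the length of the current run of equal adjacent values and returns sum(dados) as soon as a run reaches 4.
import Mathlib
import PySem

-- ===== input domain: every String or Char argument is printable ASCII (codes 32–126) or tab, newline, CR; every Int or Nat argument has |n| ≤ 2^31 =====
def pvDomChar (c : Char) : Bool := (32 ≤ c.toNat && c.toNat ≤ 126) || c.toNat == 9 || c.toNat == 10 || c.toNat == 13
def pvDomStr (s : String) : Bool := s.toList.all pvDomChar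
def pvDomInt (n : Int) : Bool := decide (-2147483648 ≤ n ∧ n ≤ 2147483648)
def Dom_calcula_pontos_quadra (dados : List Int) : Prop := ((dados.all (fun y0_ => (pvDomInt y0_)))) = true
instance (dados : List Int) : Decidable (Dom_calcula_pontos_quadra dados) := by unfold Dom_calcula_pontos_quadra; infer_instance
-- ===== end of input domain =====

-- B replaces A's dict frequency count + values scan by a sort-then-run-scan: a single
-- linear pass over sorted(dados) tracking the run length of equal adjacent values
-- (objective: alternative — same result, a genuinely different algorithm).


-- ===== PORT A =====
-- 'for v in contagem.values(): if v >= 4: return <sum>' — the early-exit scan over the values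
def pvAnyGe4 : List Int → Bool
  | [] => false
  | v :: rest => if 4 ≤ v then true else pvAnyGe4 rest

def calcula_pontos_quadra (dados : List Int) : Int :=
  let contagem := dados.foldl (fun c d => c.insert d (c.getD d 0 + 1)) PySem.Dict.empty
  if pvAnyGe4 contagem.values then dados.foldl (fun total d => total + d) 0 else 0

-- ===== PORT B =====
-- the run-length scan: prev is None initially (Option Int), run is the current run length
def pvRun4 : List Int → Option Int → Int → Bool
  | [], _, _ => false
  | x :: rest, prev, run =>
    let run' := if some x = prev then run + 1 else 1
    if 4 ≤ run' then true else pvRun4 rest (some x) run'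

def calcula_pontos_quadra_alt (dados : List Int) : Int :=
  if pvRun4 (PySem.List.sorted dados (fun x => x) false) none 0 then dados.sum else 0

-- ===== PRECONDITION & SPEC =====
def Spec_calcula_pontos_quadra (dados : List Int) (out : Int) : Prop := out = calcula_pontos_quadra_alt dados
instance (dados : List Int) (out : Int) : Decidable (Spec_calcula_pontos_quadra dados out) := by unfold Spec_calcula_pontos_quadra; infer_instance

-- ===== CLAIM (what is proved, stated in full; the proofs are below) =====
def Claim_equal_calcula_pontos_quadra : Prop := ∀ (dados : List Int), Dom_calcula_pontos_quadra dados → Spec_calcula_pontos_quadra dados (calcula_pontos_quadra dados)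

-- ===== LEMMAS AND PROOFS =====

-- count in a cons for a different head
theorem count_cons_ne {z x : Int} (l : List Int) (h : z ≠ x) :
    (x :: l).count z = l.count z := by
  simp [Ne.symm h]

-- A's values scan is 'some value ≥ 4'
theorem pvAnyGe4_iff (l : List Int) : pvAnyGe4 l = true ↔ ∃ v ∈ l, 4 ≤ v := by
  induction l with
  | nil => simp [pvAnyGe4]
  | cons v rest ih =>
    simp only [pvAnyGe4]
    split_ifs with h
    · simp [h]
    · simp [ih, h]

-- run-scan invariant on a sorted tail: prev = some p, 1 ≤ run ≤ 3, all remaining ≥ p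
theorem pvRun4_aux (s : List Int) : ∀ (p r : Int), s.Pairwise (· ≤ ·) → (∀ y ∈ s, p ≤ y) →
    1 ≤ r → r ≤ 3 →
    (pvRun4 s (some p) r = true ↔ 4 ≤ r + (s.count p : Int) ∨ ∃ x ∈ s, x ≠ p ∧ 4 ≤ (s.count x : Int)) := by
  induction s with
  | nil =>
    intro p r _ _ h1 h3
    simp [pvRun4]; omega
  | cons x rest ih =>
    intro p r hpw hge h1 h3
    have hxrest : ∀ y ∈ rest, x ≤ y := fun y hy => (List.pairwise_cons.mp hpw).1 y hy
    have hpw' : rest.Pairwise (· ≤ ·) := (List.pairwise_cons.mp hpw).2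
    simp only [pvRun4, Option.some.injEq]
    by_cases hxp : x = p
    · subst hxp
      rw [if_pos rfl]
      by_cases h4 : 4 ≤ r + 1
      · rw [if_pos h4]
        have hnn : (0:Int) ≤ (List.count x (x :: rest) : Int) := Int.natCast_nonneg _
        constructor
        · intro _; left
          have h4' : (4:Int) ≤ r + 1 := h4
          rw [List.count_cons_self]
          push_cast
          omega
        · intro _; rfl
      · rw [if_neg h4]
        rw [ih x (r + 1) hpw' hxrest (by omega) (by omega)]
        simp only [List.count_cons_self]
        constructor
        · rintro (hc | ⟨z, hz, hzx, hcz⟩)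
          · left; push_cast; omega
          · right; exact ⟨z, List.mem_cons_of_mem _ hz, hzx, by rwa [count_cons_ne rest hzx]⟩
        · rintro (hc | ⟨z, hz, hzx, hcz⟩)
          · left; push_cast at hc ⊢; omega
          · rcases List.mem_cons.mp hz with rfl | hz'
            · exact absurd rfl hzx
            · right; exact ⟨z, hz', hzx, by rwa [count_cons_ne rest hzx] at hcz⟩
    · have hpx : p < x := lt_of_le_of_ne (hge x (List.mem_cons_self)) (Ne.symm hxp)
      have hpnot : p ∉ (x :: rest) := by
        intro hmem
        rcases List.mem_cons.mp hmem with rfl | hm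
        · exact absurd rfl hxp
        · exact absurd (hxrest p hm) (not_le.mpr hpx)
      have hcp : List.count p (x :: rest) = 0 := List.count_eq_zero.mpr hpnot
      rw [if_neg hxp, if_neg (by norm_num : ¬ ((4:Int) ≤ 1))]
      rw [ih x 1 hpw' hxrest (by norm_num) (by norm_num), hcp]
      constructor
      · rintro (hc | ⟨z, hz, hzx, hcz⟩)
        · right
          exact ⟨x, List.mem_cons_self, hxp, by rw [List.count_cons_self]; push_cast; omega⟩
        · right
          have hzp : z ≠ p := by
            intro h; subst h
            exact absurd (hxrest z hz) (not_le.mpr hpx)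
          exact ⟨z, List.mem_cons_of_mem _ hz, hzp, by rwa [count_cons_ne rest hzx]⟩
      · rintro (hc | ⟨z, hz, hzp, hcz⟩)
        · push_cast at hc; omega
        · rcases List.mem_cons.mp hz with rfl | hz'
          · left; rw [List.count_cons_self] at hcz; push_cast at hcz ⊢; omega
          · by_cases hzx : z = x
            · subst hzx
              left; rw [List.count_cons_self] at hcz; push_cast at hcz ⊢; omega
            · right
              exact ⟨z, hz', hzx, by rwa [count_cons_ne rest hzx] at hcz⟩

-- top-level characterisation of the run scan on any ≤-sorted list
theorem pvRun4_iff (s : List Int) (hpw : s.Pairwise (· ≤ ·)) :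
    pvRun4 s none 0 = true ↔ ∃ x ∈ s, 4 ≤ (s.count x : Int) := by
  cases s with
  | nil => simp [pvRun4]
  | cons x rest =>
    have hxrest : ∀ y ∈ rest, x ≤ y := fun y hy => (List.pairwise_cons.mp hpw).1 y hy
    have hpw' : rest.Pairwise (· ≤ ·) := (List.pairwise_cons.mp hpw).2
    rw [show pvRun4 (x :: rest) none 0 = pvRun4 rest (some x) 1 from rfl]
    rw [pvRun4_aux rest x 1 hpw' hxrest (by norm_num) (by norm_num)]
    constructor
    · rintro (hc | ⟨z, hz, hzx, hcz⟩)
      · exact ⟨x, List.mem_cons_self, by rw [List.count_cons_self]; push_cast at hc ⊢; omega⟩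
      · exact ⟨z, List.mem_cons_of_mem _ hz, by rwa [count_cons_ne rest hzx]⟩
    · rintro ⟨z, hz, hcz⟩
      rcases List.mem_cons.mp hz with rfl | hz'
      · left; rw [List.count_cons_self] at hcz; push_cast at hcz ⊢; omega
      · by_cases hzx : z = x
        · subst hzx
          left; rw [List.count_cons_self] at hcz; push_cast at hcz ⊢; omega
        · right; exact ⟨z, hz', hzx, by rwa [count_cons_ne rest hzx] at hcz⟩

-- the two guard conditions agree
theorem guards_eq (dados : List Int) :
    pvAnyGe4 (PySem.Dict.counter dados).values
      = pvRun4 (PySem.List.sorted dados (fun x => x) false) none 0 := by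
  have hperm : (PySem.List.sorted dados (fun x => x) false).Perm dados :=
    PySem.List.sorted_perm dados (fun x => x) false
  have hpw : (PySem.List.sorted dados (fun x => x) false).Pairwise (· ≤ ·) := by
    simpa using PySem.List.sorted_pairwise dados (fun x => x)
  have hvals : (PySem.Dict.counter dados).values
      = (PySem.Set.ofList dados).map (fun k => (dados.count k : Int)) := by
    show ((PySem.Dict.counter dados).items.map (·.2))
        = (PySem.Set.ofList dados).map (fun k => (dados.count k : Int))
    rw [PySem.Dict.items_counter]
    simp
  rw [Bool.eq_iff_iff, pvAnyGe4_iff, pvRun4_iff _ hpw, hvals]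
  constructor
  · rintro ⟨v, hv, h4⟩
    rcases List.mem_map.mp hv with ⟨k, hk, rfl⟩
    have hk' : k ∈ dados := (PySem.Set.mem_ofList _ _).mp hk
    exact ⟨k, hperm.mem_iff.mpr hk', by rwa [hperm.count_eq]⟩
  · rintro ⟨z, hz, hcz⟩
    refine ⟨(dados.count z : Int), List.mem_map.mpr ⟨z, ?_, rfl⟩, ?_⟩
    · exact (PySem.Set.mem_ofList _ _).mpr (hperm.mem_iff.mp hz)
    · rwa [hperm.count_eq] at hcz

-- ===== VERDICT (by name: the statement is the Claim_ definition above) =====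
theorem calcula_pontos_quadra_spec : Claim_equal_calcula_pontos_quadra := by
  intro dados _
  show calcula_pontos_quadra dados = calcula_pontos_quadra_alt dados
  have eA : calcula_pontos_quadra dados
      = if pvAnyGe4 (PySem.Dict.counter dados).values then dados.foldl (fun total d => total + d) 0 else 0 := by
    unfold calcula_pontos_quadra
    rw [PySem.Dict.foldl_insert_getD_add_one_eq_counter]
  rw [eA]
  unfold calcula_pontos_quadra_alt
  rw [guards_eq dados]
  split
  · simpa using PySem.List.foldl_add (g := fun d : Int => d) (l := dados) (a := 0)
  · rfl
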